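-- pv_equiv track=rewrite | github.com/Sindger/SZU_Exp | Python/作业1/MasterMind.py | checklen
-- ===== SOURCE A (Python) =====
-- def checklen(str):
--     if len(str)!=5:
--         return False
--     for i in range(1,5):
--         for j in range(0,i):
--             if str[i]==str[j]:
--                 return False
--     return True
-- ===== SOURCE B (Python) =====
-- def checklen(str):
--     return len(str) == 5 and len(set(str)) == 5
-- ===== Notes on version B (the rewrite author's own statement) =====
-- stated objective: simpler
-- what changed: Replaced the nested O(n^2) pairwise index comparison with building a set of the characters once and comparing its cardinality to 5.
import Mathlib
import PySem

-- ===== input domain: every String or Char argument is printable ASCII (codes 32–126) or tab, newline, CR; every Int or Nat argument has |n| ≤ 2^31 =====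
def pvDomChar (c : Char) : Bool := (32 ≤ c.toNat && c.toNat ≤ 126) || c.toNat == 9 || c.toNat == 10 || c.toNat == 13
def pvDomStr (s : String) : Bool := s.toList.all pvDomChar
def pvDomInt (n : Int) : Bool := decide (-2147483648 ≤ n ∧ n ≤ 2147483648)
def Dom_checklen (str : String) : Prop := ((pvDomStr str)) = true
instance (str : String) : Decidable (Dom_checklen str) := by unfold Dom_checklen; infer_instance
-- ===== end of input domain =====

-- B replaces A's nested pairwise-index scan by building a set of the characters once and comparing its cardinality to 5 (simpler).

-- ===== PORT A =====
-- nested for-loops with early 'return False' ported as .all over pyRange (no side effects, so identical);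
-- pyGetD is exact here: both indices are in range whenever the loops run (the length-5 guard already returned otherwise)
def checklen (str : String) : Bool :=
  if str.toList.length ≠ 5 then false
  else
    (PySem.List.pyRange 1 5 1).all (fun i =>
      (PySem.List.pyRange 0 i 1).all (fun j =>
        !(PySem.List.pyGetD str.toList i ' ' == PySem.List.pyGetD str.toList j ' ')))

-- ===== PORT B =====
def checklen_alt (str : String) : Bool :=
  str.toList.length == 5 && PySem.Set.len (PySem.Set.ofList str.toList) == 5

-- ===== PRECONDITION & SPEC =====
def Spec_checklen (str : String) (out : Bool) : Prop := out = checklen_alt str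
instance (str : String) (out : Bool) : Decidable (Spec_checklen str out) := by unfold Spec_checklen; infer_instance

-- ===== CLAIM (what is proved, stated in full; the proofs are below) =====
def Claim_equal_checklen : Prop := ∀ (str : String), Dom_checklen str → Spec_checklen str (checklen str)

-- ===== LEMMAS AND PROOFS =====

theorem foldl_add_len_le {α : Type} [BEq α] (l : List α) (s : List α) :
    (l.foldl PySem.Set.add s).length ≤ s.length + l.length := by
  induction l generalizing s with
  | nil => simp
  | cons x l ih =>
    simp only [List.foldl_cons]
    refine le_trans (ih _) ?_
    simp only [PySem.Set.add, PySem.Set.contains]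
    split <;> simp <;> omega

theorem foldl_add_len {α : Type} [DecidableEq α] [inst : BEq α] [LawfulBEq α]
    (l : List α) (s : List α) :
    ((l.foldl PySem.Set.add s).length = s.length + l.length) ↔ (l.Nodup ∧ ∀ x ∈ l, x ∉ s) := by
  induction l generalizing s with
  | nil => simp
  | cons x l ih =>
    simp only [List.foldl_cons]
    by_cases hx : x ∈ s
    · have hadd : PySem.Set.add s x = s := by
        simp [PySem.Set.add, PySem.Set.contains, hx]
      rw [hadd]
      constructor
      · intro h
        exfalso
        have hle := foldl_add_len_le l s
        simp only [List.length_cons] at h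
        omega
      · rintro ⟨-, hall⟩
        exact absurd hx (hall x (by simp))
    · have hadd : PySem.Set.add s x = s ++ [x] :=  by
        simp [PySem.Set.add, PySem.Set.contains, hx]
      rw [hadd, show s.length + (x :: l).length = (s ++ [x]).length + l.length by
        simp; omega, ih]
      simp only [List.nodup_cons, List.mem_cons, List.mem_append, List.mem_singleton, List.not_mem_nil,
        not_or, or_false]
      constructor
      · rintro ⟨hnd, hall⟩
        have hxl : x ∉ l := fun hxl => (hall x hxl).2 rfl
        refine ⟨⟨hxl, hnd⟩, fun y hy => ?_⟩
        rcases hy with rfl | hy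
        · exact hx
        · exact (hall y hy).1
      · rintro ⟨⟨hxl, hnd⟩, hall⟩
        refine ⟨hnd, fun y hy => ⟨hall y (Or.inr hy), fun h => hxl (h ▸ hy)⟩⟩

-- (Set.ofList l).length = l.length exactly when l has no duplicates
theorem ofList_len_eq_iff {α : Type} [DecidableEq α] [BEq α] [LawfulBEq α] (l : List α) :
    ((PySem.Set.ofList l).length = l.length) ↔ l.Nodup := by
  have := foldl_add_len l ([] : List α)
  simp only [List.length_nil, Nat.zero_add, List.not_mem_nil, not_false_iff, implies_true,
    and_true] at this
  simpa [PySem.Set.ofList_eq_foldl] using this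

-- A's nested pairwise scan on a length-5 list decides Nodup
theorem checklen_inner_eq_nodup (a b c d e : Char) :
    ((PySem.List.pyRange 1 5 1).all (fun i =>
      (PySem.List.pyRange 0 i 1).all (fun j =>
        !(PySem.List.pyGetD [a,b,c,d,e] i ' ' == PySem.List.pyGetD [a,b,c,d,e] j ' '))))
    = decide ([a,b,c,d,e].Nodup) := by
  simp only [show PySem.List.pyRange 1 5 1 = [1,2,3,4] from by decide,
    show PySem.List.pyRange 0 1 1 = [0] from by decide,
    show PySem.List.pyRange 0 2 1 = [0,1] from by decide,
    show PySem.List.pyRange 0 3 1 = [0,1,2] from by decide,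
    show PySem.List.pyRange 0 4 1 = [0,1,2,3] from by decide,
    List.all_cons, List.all_nil, PySem.List.pyGetD, PySem.List.pyGet?, PySem.List.pyIdx?]
  simp only [show ∀ x y : Char, (x == y) = decide (y = x) from fun x y => by
      rw [beq_eq_decide]; exact decide_eq_decide.mpr eq_comm]
  simp only [List.nodup_cons, List.mem_cons, List.not_mem_nil, List.nodup_nil, not_or,
    and_true, or_false]
  simp [Bool.and_assoc, Bool.and_comm, Bool.and_left_comm]

-- ===== VERDICT (by name: the statement is the Claim_ definition above) =====
theorem checklen_spec : Claim_equal_checklen := by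
  intro str _
  unfold Spec_checklen checklen checklen_alt
  match hl : str.toList with
  | [a,b,c,d,e] =>
    have h5 : ([a,b,c,d,e] : List Char).length = 5 := rfl
    rw [if_neg (by simp), checklen_inner_eq_nodup]
    have := ofList_len_eq_iff (α := Char) [a,b,c,d,e]
    by_cases hnd : ([a,b,c,d,e] : List Char).Nodup
    · have hlen := this.mpr hnd
      simp only [PySem.Set.len, hlen, h5, hnd, decide_true]
      decide
    · have hne : (PySem.Set.ofList [a,b,c,d,e]).length ≠ 5 := fun h => hnd (this.mp h)
      simp only [PySem.Set.len, hnd, decide_false]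
      symm
      rw [Bool.eq_false_iff]
      simp only [ne_eq, Bool.and_eq_true, beq_iff_eq, not_and]
      intro _ hcast
      exact hne (by exact_mod_cast hcast)
  | [] | [_] | [_,_] | [_,_,_] | [_,_,_,_] | _::_::_::_::_::_::_ => simp [PySem.Set.len]
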